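-- pv_equiv track=rewrite | github.com/gamiphys/note | 物理学実験2 - コピー/4/import cmath.py | find_integer_combinations
-- ===== SOURCE A (Python) =====
-- import math
--
-- def find_integer_combinations(a):
--     combinations = []
--     limit = int(math.sqrt(a)) + 1
--     for h in range(-limit, limit):
--         for k in range(-limit, limit):
--             for l in range(-limit, limit):
--                 if h**2 + k**2 + l**2 == a:
--                     combinations.append((h, k, l))
--     return combinations
-- ===== SOURCE B (Python) =====
-- import math
--
-- def find_integer_combinations(a):
--     if a < 0:
--         return []
--     combinations = []
--     r = math.isqrt(a)
--     for h in range(-r, r + 1):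
--         rem1 = a - h * h
--         s = math.isqrt(rem1)
--         for k in range(-s, s + 1):
--             rem2 = rem1 - k * k
--             l0 = math.isqrt(rem2)
--             if l0 * l0 == rem2:
--                 if l0 > 0:
--                     combinations.append((h, k, -l0))
--                 combinations.append((h, k, l0))
--     return combinations
-- ===== Notes on version B (the rewrite author's own statement) =====
-- stated objective: faster
-- what changed: Replaced the cubic triple loop over [-limit,limit) by a double loop over h,k that tests whether a-h^2-k^2 is a perfect square via isqrt and emits -root then root directly, shrinking ranges to the exact bounds.
import Mathlib
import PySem

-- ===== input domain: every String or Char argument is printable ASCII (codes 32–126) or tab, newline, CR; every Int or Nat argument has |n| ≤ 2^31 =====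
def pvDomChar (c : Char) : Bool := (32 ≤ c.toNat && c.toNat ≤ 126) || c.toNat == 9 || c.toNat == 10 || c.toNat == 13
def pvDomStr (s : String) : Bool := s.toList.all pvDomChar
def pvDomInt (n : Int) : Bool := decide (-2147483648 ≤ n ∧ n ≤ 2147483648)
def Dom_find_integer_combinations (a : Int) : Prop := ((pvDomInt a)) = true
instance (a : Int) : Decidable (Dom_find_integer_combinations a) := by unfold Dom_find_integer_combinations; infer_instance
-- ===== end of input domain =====

-- B replaces A's cubic triple loop by a double loop with a perfect-square test for the
-- third coordinate (objective: faster, asymptotically).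

-- ===== PORT A =====
-- 'int(math.sqrt(a))' equals Int.sqrt a (floor of the square root) exactly for 0 ≤ a ≤ 2^31,
-- the whole of Dom ∩ Pre_ (double-precision sqrt is correctly rounded and the gap between
-- consecutive squares exceeds the rounding error there).
def find_integer_combinations (a : Int) : List (List Int) :=
  let limit := Int.sqrt a + 1
  (PySem.List.pyRange (-limit) limit 1).foldl (fun acc h =>
    (PySem.List.pyRange (-limit) limit 1).foldl (fun acc k =>
      (PySem.List.pyRange (-limit) limit 1).foldl (fun acc l =>
        if h ^ 2 + k ^ 2 + l ^ 2 = a then acc ++ [[h, k, l]] else acc) acc) acc) []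

-- ===== PORT B =====
def find_integer_combinations_alt (a : Int) : List (List Int) :=
  if a < 0 then []
  else
    let r := Int.sqrt a
    (PySem.List.pyRange (-r) (r + 1) 1).foldl (fun acc h =>
      let rem1 := a - h * h
      let s := Int.sqrt rem1
      (PySem.List.pyRange (-s) (s + 1) 1).foldl (fun acc2 k =>
        let rem2 := rem1 - k * k
        let l0 := Int.sqrt rem2
        if l0 * l0 = rem2 then
          (if 0 < l0 then acc2 ++ [[h, k, -l0]] else acc2) ++ [[h, k, l0]]
        else acc2) acc) []

-- ===== PRECONDITION & SPEC =====
-- Pre_ excludes negative inputs, on which Python's math.sqrt raises ValueError (B returns an empty list there).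
def Pre_find_integer_combinations (a : Int) : Prop := 0 ≤ a
instance (a : Int) : Decidable (Pre_find_integer_combinations a) := by unfold Pre_find_integer_combinations; infer_instance
def pvWitness_find_integer_combinations : Int := (3)

def Spec_find_integer_combinations (a : Int) (out : List (List Int)) : Prop := out = find_integer_combinations_alt a
instance (a : Int) (out : List (List Int)) : Decidable (Spec_find_integer_combinations a out) := by unfold Spec_find_integer_combinations; infer_instance

-- ===== CLAIM (what is proved, stated in full; the proofs are below) =====
def Claim_equal_find_integer_combinations : Prop := ∀ (a : Int), Dom_find_integer_combinations a → Pre_find_integer_combinations a → Spec_find_integer_combinations a (find_integer_combinations a)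

-- ===== LEMMAS AND PROOFS =====

-- facts about Int.sqrt (floor square root)
theorem pvSqrtSqLe (m : Int) (h : 0 ≤ m) : Int.sqrt m * Int.sqrt m ≤ m := by
  unfold Int.sqrt
  have h1 : (m.toNat.sqrt : Int) * m.toNat.sqrt ≤ m.toNat := by
    have := Nat.sqrt_le' m.toNat
    rw [pow_two] at this
    exact_mod_cast this
  omega

theorem pvLtSqrtSuccSq (m : Int) (h : 0 ≤ m) : m < (Int.sqrt m + 1) * (Int.sqrt m + 1) := by
  unfold Int.sqrt
  have h1 : (m.toNat : Int) < ((m.toNat.sqrt : Int) + 1) * ((m.toNat.sqrt : Int) + 1) := by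
    have := Nat.lt_succ_sqrt' m.toNat
    rw [pow_two, Nat.succ_eq_add_one] at this
    exact_mod_cast this
  omega

theorem pvSqrtNegZero (m : Int) (h : m < 0) : Int.sqrt m = 0 := by
  unfold Int.sqrt
  have : m.toNat = 0 := by omega
  simp [this]

theorem pvSqrtMono (m n : Int) (h : m ≤ n) : Int.sqrt m ≤ Int.sqrt n := by
  unfold Int.sqrt
  have := Nat.sqrt_le_sqrt (show m.toNat ≤ n.toNat by omega)
  omega

-- the list of l's B emits at a given (h, k)
def pvBody (a h k : Int) : List (List Int) :=
  if Int.sqrt (a - h * h - k * k) * Int.sqrt (a - h * h - k * k) = a - h * h - k * k then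
    (if 0 < Int.sqrt (a - h * h - k * k) then [[h, k, -Int.sqrt (a - h * h - k * k)]] else []) ++
      [[h, k, Int.sqrt (a - h * h - k * k)]]
  else []

theorem pvBodyNeg (a h k : Int) (hm : a - h * h - k * k < 0) : pvBody a h k = [] := by
  unfold pvBody
  rw [pvSqrtNegZero _ hm]
  simp
  omega

theorem pvFilterNil (p : Int → Prop) [DecidablePred p] (lo hi : Int)
    (h : ∀ x, lo ≤ x → x < hi → ¬ p x) :
    (PySem.List.pyRange lo hi 1).filter (fun x => decide (p x)) = [] := by
  rw [List.filter_eq_nil_iff]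
  intro x hx
  rw [PySem.List.mem_pyRange_one] at hx
  simpa using h x hx.1 hx.2

theorem pvFlatMapNarrow {β : Type} (G : Int → List β) (lo lo' hi' hi : Int)
    (h1 : lo ≤ lo') (h2 : lo' ≤ hi') (h3 : hi' ≤ hi)
    (hz : ∀ x, lo ≤ x → x < hi → (x < lo' ∨ hi' ≤ x) → G x = []) :
    (PySem.List.pyRange lo hi 1).flatMap G = (PySem.List.pyRange lo' hi' 1).flatMap G := by
  rw [PySem.List.pyRange_one_append lo lo' hi h1 (le_trans h2 h3),
      PySem.List.pyRange_one_append lo' hi' hi h2 h3]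
  rw [List.flatMap_append, List.flatMap_append]
  have hleft : (PySem.List.pyRange lo lo' 1).flatMap G = [] := by
    rw [List.flatMap_eq_nil_iff]
    intro x hx
    rw [PySem.List.mem_pyRange_one] at hx
    exact hz x hx.1 (by omega) (Or.inl hx.2)
  have hright : (PySem.List.pyRange hi' hi 1).flatMap G = [] := by
    rw [List.flatMap_eq_nil_iff]
    intro x hx
    rw [PySem.List.mem_pyRange_one] at hx
    exact hz x (by omega) hx.2 (Or.inr hx.1)
  rw [hleft, hright]
  simp

-- the filtered l-column of A's innermost loop equals B's emitted list
theorem pvInner (a h k : Int) :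
    ((PySem.List.pyRange (-(Int.sqrt a + 1)) (Int.sqrt a + 1) 1).filter
        (fun l => decide (h ^ 2 + k ^ 2 + l ^ 2 = a))).map (fun l => [h, k, l]) = pvBody a h k := by
  have hpred : (fun l : Int => decide (h ^ 2 + k ^ 2 + l ^ 2 = a)) =
      (fun l : Int => decide (l * l = a - h * h - k * k)) := by
    funext l
    simp only [decide_eq_decide, pow_two]
    omega
  rw [hpred]
  set m := a - h * h - k * k with hmdef
  set r := Int.sqrt a with hrdef
  have hr0 : 0 ≤ r := Int.sqrt_nonneg a
  by_cases hm : m < 0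
  · rw [pvFilterNil _ _ _ (by intro x _ _ hx; nlinarith [mul_self_nonneg x]), pvBodyNeg a h k hm]
    simp
  · rw [not_lt] at hm
    set l0 := Int.sqrt m with hl0def
    have hl00 : 0 ≤ l0 := Int.sqrt_nonneg m
    have hle : l0 * l0 ≤ m := pvSqrtSqLe m hm
    have hlt : m < (l0 + 1) * (l0 + 1) := pvLtSqrtSuccSq m hm
    have hma : m ≤ a := by nlinarith [mul_self_nonneg h, mul_self_nonneg k]
    have hl0r : l0 ≤ r := pvSqrtMono m a hma
    by_cases hsq : l0 * l0 = m
    · have huniq : ∀ x : Int, x * x = m → x = -l0 ∨ x = l0 := by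
        intro x hx
        have h1 : Int.sqrt m = x.natAbs := by rw [← hx]; exact Int.sqrt_eq x
        rw [← hl0def] at h1
        omega
      by_cases h0 : 0 < l0
      · rw [PySem.List.pyRange_one_append (-(r + 1)) (-l0) (r + 1) (by omega) (by omega),
            PySem.List.pyRange_one_append (-l0) l0 (r + 1) (by omega) (by omega),
            PySem.List.pyRange_one_cons (show -l0 < l0 by omega),
            PySem.List.pyRange_one_cons (show l0 < r + 1 by omega)]
        rw [List.filter_append, List.filter_append, List.filter_cons, List.filter_cons]
        rw [pvFilterNil _ _ _ (by intro x h1 h2 hx; rcases huniq x hx with h' | h' <;> omega),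
            pvFilterNil (lo := -l0 + 1) (hi := l0) _
              (by intro x h1 h2 hx; rcases huniq x hx with h' | h' <;> omega),
            pvFilterNil (lo := l0 + 1) (hi := r + 1) _
              (by intro x h1 h2 hx; rcases huniq x hx with h' | h' <;> omega)]
        have e1 : (-l0) * (-l0) = m := by rw [neg_mul_neg]; exact hsq
        simp only [e1, hsq, decide_true, if_pos, List.nil_append]
        unfold pvBody
        rw [← hmdef, ← hl0def, if_pos hsq, if_pos h0]
        simp
      · have hl0z : l0 = 0 := by omega
        have hmz : m = 0 := by rw [hl0z] at hsq; omega
        rw [PySem.List.pyRange_one_append (-(r + 1)) 0 (r + 1) (by omega) (by omega),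
            PySem.List.pyRange_one_cons (show (0 : Int) < r + 1 by omega)]
        rw [List.filter_append, List.filter_cons]
        rw [pvFilterNil _ _ _ (by intro x h1 h2 hx; rcases huniq x hx with h' | h' <;> omega),
            pvFilterNil (lo := (0 : Int) + 1) (hi := r + 1) _
              (by intro x h1 h2 hx; rcases huniq x hx with h' | h' <;> omega)]
        have e0 : (0 : Int) * 0 = m := by omega
        simp only [e0, decide_true, if_pos, List.nil_append]
        unfold pvBody
        rw [← hmdef, ← hl0def, if_pos hsq, if_neg h0]
        simp [hl0z]
    · rw [pvFilterNil _ _ _ ?_]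
      · unfold pvBody
        rw [← hmdef, ← hl0def, if_neg hsq]
        simp
      · intro x _ _ hx
        have h1 : Int.sqrt m = x.natAbs := by rw [← hx]; exact Int.sqrt_eq x
        have hnab : (x.natAbs : Int) * x.natAbs = x * x := by
          exact_mod_cast Int.natAbs_mul_self' x
        rw [← hl0def] at h1
        rw [h1] at hsq
        rw [hnab] at hsq
        exact hsq hx

-- A in flatMap form
theorem pvStepA (a : Int) :
    find_integer_combinations a =
      (PySem.List.pyRange (-(Int.sqrt a + 1)) (Int.sqrt a + 1) 1).flatMap (fun h =>
        (PySem.List.pyRange (-(Int.sqrt a + 1)) (Int.sqrt a + 1) 1).flatMap (fun k =>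
          pvBody a h k)) := by
  simp only [find_integer_combinations]
  have hinner : ∀ (h k : Int) (acc : List (List Int)),
      (PySem.List.pyRange (-(Int.sqrt a + 1)) (Int.sqrt a + 1) 1).foldl
        (fun acc l => if h ^ 2 + k ^ 2 + l ^ 2 = a then acc ++ [[h, k, l]] else acc) acc =
      acc ++ pvBody a h k := by
    intro h k acc
    rw [PySem.List.foldl_append_ite (p := fun l => h ^ 2 + k ^ 2 + l ^ 2 = a)
        (f := fun l => [h, k, l]), pvInner a h k]
  have hmid : ∀ (h : Int) (acc : List (List Int)),
      (PySem.List.pyRange (-(Int.sqrt a + 1)) (Int.sqrt a + 1) 1).foldl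
        (fun acc k => (PySem.List.pyRange (-(Int.sqrt a + 1)) (Int.sqrt a + 1) 1).foldl
          (fun acc l => if h ^ 2 + k ^ 2 + l ^ 2 = a then acc ++ [[h, k, l]] else acc) acc) acc =
      acc ++ (PySem.List.pyRange (-(Int.sqrt a + 1)) (Int.sqrt a + 1) 1).flatMap
        (fun k => pvBody a h k) := by
    intro h acc
    refine Eq.trans (PySem.List.foldl_congr_mem _ _ (fun acc k => acc ++ pvBody a h k) _ ?_)
      (PySem.List.foldl_append_eq_flatMap _ _ _)
    intro acc' k _
    exact hinner h k acc'
  refine Eq.trans (PySem.List.foldl_congr_mem _ _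
      (fun acc h => acc ++ (PySem.List.pyRange (-(Int.sqrt a + 1)) (Int.sqrt a + 1) 1).flatMap
        (fun k => pvBody a h k)) _ ?_) ?_
  · intro acc h _
    exact hmid h acc
  · rw [PySem.List.foldl_append_eq_flatMap]
    simp

-- B in flatMap form
theorem pvStepB (a : Int) (ha : 0 ≤ a) :
    find_integer_combinations_alt a =
      (PySem.List.pyRange (-Int.sqrt a) (Int.sqrt a + 1) 1).flatMap (fun h =>
        (PySem.List.pyRange (-Int.sqrt (a - h * h)) (Int.sqrt (a - h * h) + 1) 1).flatMap
          (fun k => pvBody a h k)) := by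
  simp only [find_integer_combinations_alt]
  rw [if_neg (show ¬ a < 0 by omega)]
  have hinner : ∀ (h k : Int) (acc2 : List (List Int)),
      (if Int.sqrt (a - h * h - k * k) * Int.sqrt (a - h * h - k * k) = a - h * h - k * k then
        (if 0 < Int.sqrt (a - h * h - k * k) then
          acc2 ++ [[h, k, -Int.sqrt (a - h * h - k * k)]] else acc2) ++
          [[h, k, Int.sqrt (a - h * h - k * k)]]
      else acc2) = acc2 ++ pvBody a h k := by
    intro h k acc2
    unfold pvBody
    split_ifs <;> simp
  have hmid : ∀ (h : Int) (acc : List (List Int)),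
      (PySem.List.pyRange (-Int.sqrt (a - h * h)) (Int.sqrt (a - h * h) + 1) 1).foldl
        (fun acc2 k =>
          if Int.sqrt (a - h * h - k * k) * Int.sqrt (a - h * h - k * k) = a - h * h - k * k then
            (if 0 < Int.sqrt (a - h * h - k * k) then
              acc2 ++ [[h, k, -Int.sqrt (a - h * h - k * k)]] else acc2) ++
              [[h, k, Int.sqrt (a - h * h - k * k)]]
          else acc2) acc =
      acc ++ (PySem.List.pyRange (-Int.sqrt (a - h * h)) (Int.sqrt (a - h * h) + 1) 1).flatMap
        (fun k => pvBody a h k) := by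
    intro h acc
    refine Eq.trans (PySem.List.foldl_congr_mem _ _ (fun acc2 k => acc2 ++ pvBody a h k) _ ?_)
      (PySem.List.foldl_append_eq_flatMap _ _ _)
    intro acc2 k _
    exact hinner h k acc2
  refine Eq.trans (PySem.List.foldl_congr_mem _ _
      (fun acc h => acc ++
        (PySem.List.pyRange (-Int.sqrt (a - h * h)) (Int.sqrt (a - h * h) + 1) 1).flatMap
          (fun k => pvBody a h k)) _ ?_) ?_
  · intro acc h _
    exact hmid h acc
  · rw [PySem.List.foldl_append_eq_flatMap]
    simp

-- ===== VERDICT (by name: the statement is the Claim_ definition above) =====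
theorem find_integer_combinations_spec : Claim_equal_find_integer_combinations := by
  intro a _hDom hPre
  unfold Spec_find_integer_combinations
  have ha : 0 ≤ a := hPre
  set r := Int.sqrt a with hrdef
  have hr0 : 0 ≤ r := Int.sqrt_nonneg a
  have hra : a < (r + 1) * (r + 1) := pvLtSqrtSuccSq a ha
  rw [pvStepA a, pvStepB a ha]
  rw [← hrdef]
  rw [pvFlatMapNarrow _ (-(r + 1)) (-r) (r + 1) (r + 1) (by omega) (by omega) (by omega) ?_]
  · apply List.flatMap_congr
    intro h hh
    rw [PySem.List.mem_pyRange_one] at hh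
    have hh2 : h * h ≤ r * r := by nlinarith
    have hs0 : 0 ≤ a - h * h := by nlinarith [pvSqrtSqLe a ha]
    have hslt : a - h * h < (Int.sqrt (a - h * h) + 1) * (Int.sqrt (a - h * h) + 1) :=
      pvLtSqrtSuccSq _ hs0
    have hs1 : 0 ≤ Int.sqrt (a - h * h) := Int.sqrt_nonneg _
    have hsr : Int.sqrt (a - h * h) ≤ r := pvSqrtMono _ a (by nlinarith [mul_self_nonneg h])
    rw [pvFlatMapNarrow _ (-(r + 1)) (-Int.sqrt (a - h * h)) (Int.sqrt (a - h * h) + 1) (r + 1)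
        (by omega) (by omega) (by omega) ?_]
    intro k _ _ hk
    apply pvBodyNeg
    rcases hk with hk | hk <;> nlinarith
  · intro x _ _ hx
    rw [List.flatMap_eq_nil_iff]
    intro k _
    apply pvBodyNeg
    rcases hx with hx | hx <;> nlinarith
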